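-- pv_equiv track=rewrite | github.com/kjake/vehicle-classifier | train.py | _top_confusions
-- ===== SOURCE A (Python) =====
-- from typing import Dict, List, Optional, Sequence, Tuple
--
-- def _top_confusions(cm: List[List[int]], top_n: int) -> List[Tuple[int, int, int]]:
--     out: List[Tuple[int, int, int]] = []
--     n = len(cm)
--     for i in range(n):
--         for j in range(n):
--             if i == j:
--                 continue
--             c = int(cm[i][j])
--             if c > 0:
--                 out.append((i, j, c))
--     out.sort(key=lambda t: t[2], reverse=True)
--     return out[:max(0, top_n)]
-- ===== SOURCE B (Python) =====
-- from typing import List, Tuple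
--
-- def _top_confusions(cm: List[List[int]], top_n: int) -> List[Tuple[int, int, int]]:
--     n = len(cm)
--     entries = [(i, j, int(v))
--                for i, row in enumerate(cm)
--                for j, v in enumerate(row[:n])
--                if i != j and int(v) > 0]
--     buckets = {}
--     for t in entries:
--         buckets.setdefault(t[2], []).append(t)
--     out: List[Tuple[int, int, int]] = []
--     for c in sorted(buckets, reverse=True):
--         out += buckets[c]
--     return out[:max(0, top_n)]
-- ===== Notes on version B (the rewrite author's own statement) =====
-- stated objective: alternative
-- what changed: B collects the positive off-diagonal entries with one enumerate-based comprehension and, instead of sorting the whole entry list descending and slicing, groups the entries into a dict of buckets keyed by count and concatenates the buckets along the descending sorted distinct counts (ties keep row-major order because each bucket is built in scan order).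
import Mathlib
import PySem

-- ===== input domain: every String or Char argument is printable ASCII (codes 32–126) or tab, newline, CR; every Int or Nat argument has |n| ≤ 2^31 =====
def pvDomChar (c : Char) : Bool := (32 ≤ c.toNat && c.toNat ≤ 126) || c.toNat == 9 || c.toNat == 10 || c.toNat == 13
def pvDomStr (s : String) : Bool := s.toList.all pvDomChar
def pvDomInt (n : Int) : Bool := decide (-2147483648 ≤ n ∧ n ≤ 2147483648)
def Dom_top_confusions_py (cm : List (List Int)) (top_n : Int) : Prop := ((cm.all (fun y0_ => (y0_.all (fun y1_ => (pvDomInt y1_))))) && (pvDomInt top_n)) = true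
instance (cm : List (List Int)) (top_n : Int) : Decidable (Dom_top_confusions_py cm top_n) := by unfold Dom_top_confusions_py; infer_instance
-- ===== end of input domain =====

-- B replaces A's global descending sort of all off-diagonal entries by a bucket dict keyed by
-- count (grouping in one pass, then concatenating buckets by descending distinct count);
-- objective: alternative selection mechanism of similar cost.

-- ===== PORT A =====
def top_confusions_py (cm : List (List Int)) (top_n : Int) : List (Int × Int × Int) :=
  let n : Int := cm.length
  let out : List (Int × Int × Int) :=
    (PySem.List.pyRange 0 n 1).foldl (fun out i =>
      (PySem.List.pyRange 0 n 1).foldl (fun out j =>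
        if i = j then out
        else
          let c := PySem.List.pyGetD (PySem.List.pyGetD cm i []) j 0
          if 0 < c then out ++ [(i, j, c)] else out) out) []
  PySem.List.slice (PySem.List.sorted out (fun t => t.2.2) true) none (some (max 0 top_n))

-- ===== PORT B =====
def top_confusions_py_alt (cm : List (List Int)) (top_n : Int) : List (Int × Int × Int) :=
  let n : Int := cm.length
  let entries : List (Int × Int × Int) :=
    (PySem.List.enumerate cm 0).flatMap (fun p =>
      (PySem.List.enumerate (PySem.List.slice p.2 none (some n)) 0).filterMap (fun q =>
        if p.1 ≠ q.1 ∧ 0 < q.2 then some (p.1, q.1, q.2) else none))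
  let buckets : PySem.Dict Int (List (Int × Int × Int)) :=
    entries.foldl (fun d t => d.insert t.2.2 (d.getD t.2.2 [] ++ [t])) PySem.Dict.empty
  let out : List (Int × Int × Int) :=
    (PySem.List.sorted buckets.keys (fun c => c) true).foldl
      (fun out c => out ++ buckets.getD c []) []
  PySem.List.slice out none (some (max 0 top_n))

-- ===== PRECONDITION & SPEC =====
-- Pre_ excludes exactly the inputs on which Python A raises IndexError: some row i is shorter
-- than the largest column index the double loop reads in it (n-1 for the last row, n otherwise).
def Pre_top_confusions_py (cm : List (List Int)) (top_n : Int) : Prop :=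
  ∀ i, i < cm.length → cm.length ≤ (cm.getD i []).length + (if i + 1 = cm.length then 1 else 0)
instance (cm : List (List Int)) (top_n : Int) : Decidable (Pre_top_confusions_py cm top_n) := by
  unfold Pre_top_confusions_py; infer_instance
def pvWitness_top_confusions_py : List (List Int) × Int := ([[0, 2], [3, 0]], 1)

def Spec_top_confusions_py (cm : List (List Int)) (top_n : Int) (out : List (Int × Int × Int)) : Prop := out = top_confusions_py_alt cm top_n
instance (cm : List (List Int)) (top_n : Int) (out : List (Int × Int × Int)) : Decidable (Spec_top_confusions_py cm top_n out) := by unfold Spec_top_confusions_py; infer_instance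

-- ===== CLAIM (what is proved, stated in full; the proofs are below) =====
def Claim_equal_top_confusions_py : Prop := ∀ (cm : List (List Int)) (top_n : Int), Dom_top_confusions_py cm top_n → Pre_top_confusions_py cm top_n → Spec_top_confusions_py cm top_n (top_confusions_py cm top_n)

-- ===== LEMMAS AND PROOFS =====

-- The canonical row-major list of positive off-diagonal entries (what both collection loops build).
def pvEntries (cm : List (List Int)) : List (Int × Int × Int) :=
  (PySem.List.enumerate cm 0).flatMap (fun p =>
    (PySem.List.enumerate (p.2.take cm.length) 0).filterMap (fun q =>
      if p.1 ≠ q.1 ∧ 0 < q.2 then some (p.1, q.1, q.2) else none))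

-- insertBy passes over a prefix it does not go before
lemma pv_insertBy_skip {α : Type} (before : α → α → Bool) (x : α) (L1 L2 : List α)
    (h : ∀ y ∈ L1, before x y = false) :
    PySem.List.insertBy before x (L1 ++ L2) = L1 ++ PySem.List.insertBy before x L2 := by
  induction L1 with
  | nil => simp
  | cons y L1 ih =>
      have hy : before x y = false := h y (by simp)
      simp [PySem.List.insertBy, hy, ih (fun z hz => h z (by simp [hz]))]

-- insertBy drops in front of a block it goes before
lemma pv_insertBy_front {α : Type} (before : α → α → Bool) (x : α) (L : List α)
    (h : ∀ y ∈ L, before x y = true) :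
    PySem.List.insertBy before x L = x :: L := by
  cases L with
  | nil => rfl
  | cons y L => simp [PySem.List.insertBy, h y (by simp)]

-- stable reverse sort by count = concatenation of count-buckets along any strictly
-- descending key list covering all counts
lemma pv_sorted_flat (D : List Int) (hD : D.Pairwise (fun a b => b < a)) :
    ∀ (E : List (Int × Int × Int)), (∀ t ∈ E, t.2.2 ∈ D) →
      PySem.List.sorted E (fun t => t.2.2) true
        = D.flatMap (fun c => E.filter (fun t => t.2.2 == c)) := by
  intro E
  induction E using List.reverseRecOn with
  | nil => intro _; simp [PySem.List.sorted, List.flatMap_eq_nil_iff]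
  | append_singleton E x ih =>
      intro hcov
      have hxD : x.2.2 ∈ D := hcov x (by simp)
      obtain ⟨D1, D2, hsplit⟩ := List.append_of_mem hxD
      subst hsplit
      have hpair := hD
      rw [List.pairwise_append] at hpair
      obtain ⟨_, hp2, hcross⟩ := hpair
      have hD1 : ∀ d ∈ D1, x.2.2 < d := fun d hd => hcross d hd x.2.2 (by simp)
      have hD2 : ∀ d ∈ D2, d < x.2.2 := (List.pairwise_cons.1 hp2).1
      have ihE := ih (fun t ht => hcov t (by simp [ht]))
      -- rewrite both sorts as foldl of insertBy and peel the last element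
      rw [PySem.List.sorted_rev_eq_foldl_insertBy] at ihE ⊢
      rw [List.foldl_append]
      simp only [List.foldl_cons, List.foldl_nil]
      rw [ihE]
      -- the flatMap over D1 ++ x.2.2 :: D2 of the old buckets
      have hflat :
          (D1 ++ x.2.2 :: D2).flatMap (fun c => E.filter (fun t => t.2.2 == c))
            = (D1.flatMap (fun c => E.filter (fun t => t.2.2 == c))
                ++ E.filter (fun t => t.2.2 == x.2.2))
              ++ D2.flatMap (fun c => E.filter (fun t => t.2.2 == c)) := by
        simp [List.flatMap_append, List.append_assoc]
      rw [hflat]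
      rw [pv_insertBy_skip _ x _ _ ?_]
      · rw [pv_insertBy_front _ x _ ?_]
        · -- now compare with the new buckets
          have hnew :
              (D1 ++ x.2.2 :: D2).flatMap (fun c => (E ++ [x]).filter (fun t => t.2.2 == c))
                = (D1.flatMap (fun c => E.filter (fun t => t.2.2 == c))
                    ++ E.filter (fun t => t.2.2 == x.2.2))
                  ++ x :: D2.flatMap (fun c => E.filter (fun t => t.2.2 == c)) := by
            have h1 : D1.flatMap (fun c => (E ++ [x]).filter (fun t => t.2.2 == c))
                = D1.flatMap (fun c => E.filter (fun t => t.2.2 == c)) := by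
              apply List.flatMap_congr
              intro c hc
              have : ¬ (x.2.2 == c) = true := by
                simp only [beq_iff_eq]
                exact fun h => absurd (hD1 c hc) (by omega)
              simp [List.filter_append, this]
            have h2 : D2.flatMap (fun c => (E ++ [x]).filter (fun t => t.2.2 == c))
                = D2.flatMap (fun c => E.filter (fun t => t.2.2 == c)) := by
              apply List.flatMap_congr
              intro c hc
              have : ¬ (x.2.2 == c) = true := by
                simp only [beq_iff_eq]
                exact fun h => absurd (hD2 c hc) (by omega)
              simp [List.filter_append, this]
            rw [List.flatMap_append, List.flatMap_cons, h1, h2]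
            have h3 : (E ++ [x]).filter (fun t => t.2.2 == x.2.2)
                = E.filter (fun t => t.2.2 == x.2.2) ++ [x] := by
              simp [List.filter_append]
            rw [h3]
            simp [List.append_assoc]
          rw [hnew]
        · -- every element of the D2-buckets has key < x.2.2
          intro y hy
          simp only [List.mem_flatMap, List.mem_filter, beq_iff_eq] at hy
          obtain ⟨c, hc, _, hkey⟩ := hy
          simp only [decide_eq_true_eq]
          rw [hkey]; exact hD2 c hc
      · -- no element of the D1-buckets or the x.2.2-bucket has key < x.2.2
        intro y hy
        simp only [List.mem_append, List.mem_flatMap, List.mem_filter, beq_iff_eq] at hy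
        simp only [decide_eq_false_iff_not, not_lt]
        rcases hy with ⟨c, hc, _, hkey⟩ | ⟨_, hkey⟩
        · rw [hkey]; exact le_of_lt (hD1 c hc)
        · rw [hkey]

-- the inner loop of A equals the filtered enumeration of the truncated row
lemma pv_inner_eq (row : List Int) (i : Int) :
    ∀ (m : Nat) (acc : List (Int × Int × Int)),
      (PySem.List.pyRange 0 (m : Int) 1).foldl (fun out j =>
          if i = j then out
          else
            if 0 < PySem.List.pyGetD row j 0 then
              out ++ [(i, j, PySem.List.pyGetD row j 0)] else out) acc
        = acc ++ (PySem.List.enumerate (row.take m) 0).filterMap (fun q =>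
            if i ≠ q.1 ∧ 0 < q.2 then some (i, q.1, q.2) else none) := by
  intro m
  induction m with
  | zero => intro acc; simp [PySem.List.pyRange_one_eq_nil (le_refl (0 : Int))]
  | succ m ih =>
      intro acc
      have hcast : ((m + 1 : Nat) : Int) = (m : Int) + 1 := by push_cast; ring
      rw [hcast, PySem.List.pyRange_one_succ_right (by positivity), List.foldl_append, ih]
      simp only [List.foldl_cons, List.foldl_nil]
      by_cases hm : m < row.length
      · have hgetD : PySem.List.pyGetD row (m : Int) 0 = row[m] := by
          rw [PySem.List.pyGetD_natCast]
          exact List.getD_eq_getElem row 0 hm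
        have htake : row.take (m + 1) = row.take m ++ [row[m]] := by
          rw [List.take_add_one]
          simp [List.getElem?_eq_getElem hm]
        rw [htake, PySem.List.enumerate_append, List.filterMap_append]
        have hlen : ((row.take m).length : Int) = (m : Int) := by
          simp [List.length_take, Nat.min_eq_left (Nat.le_of_lt hm)]
        rw [PySem.List.enumerate_cons]
        simp only [PySem.List.enumerate_nil, hlen, List.filterMap_cons, List.filterMap_nil]
        by_cases hij : i = (m : Int)
        · simp [hij]
        · by_cases hpos : 0 < row[m]
          · simp [hij, hgetD, hpos, List.append_assoc]
          · simp [hij, hgetD, hpos]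
      · have hle : row.length ≤ m := Nat.le_of_not_lt hm
        have htake1 : row.take (m + 1) = row := List.take_of_length_le (by omega)
        have htake0 : row.take m = row := List.take_of_length_le hle
        have hgetD : PySem.List.pyGetD row (m : Int) 0 = 0 := by
          rw [PySem.List.pyGetD_natCast]
          exact List.getD_eq_default row 0 hle
        rw [htake1, htake0]
        by_cases hij : i = (m : Int) <;> simp [hij, hgetD]

-- the whole collection loop of A builds pvEntries
lemma pv_outA_eq (cm : List (List Int)) :
    (PySem.List.pyRange 0 (cm.length : Int) 1).foldl (fun out i =>
        (PySem.List.pyRange 0 (cm.length : Int) 1).foldl (fun out j =>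
          if i = j then out
          else
            if 0 < PySem.List.pyGetD (PySem.List.pyGetD cm i []) j 0 then
              out ++ [(i, j, PySem.List.pyGetD (PySem.List.pyGetD cm i []) j 0)] else out) out) []
      = pvEntries cm := by
  have h1 : ∀ (acc : List (Int × Int × Int)),
      (PySem.List.pyRange 0 (cm.length : Int) 1).foldl (fun out i =>
        (PySem.List.pyRange 0 (cm.length : Int) 1).foldl (fun out j =>
          if i = j then out
          else
            if 0 < PySem.List.pyGetD (PySem.List.pyGetD cm i []) j 0 then
              out ++ [(i, j, PySem.List.pyGetD (PySem.List.pyGetD cm i []) j 0)] else out) out) acc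
      = (PySem.List.pyRange 0 (cm.length : Int) 1).foldl (fun out i =>
          out ++ (PySem.List.enumerate ((PySem.List.pyGetD cm i []).take cm.length) 0).filterMap
            (fun q => if i ≠ q.1 ∧ 0 < q.2 then some (i, q.1, q.2) else none)) acc := by
    intro acc
    apply PySem.List.foldl_congr_mem
    intro out i _
    exact pv_inner_eq (PySem.List.pyGetD cm i []) i cm.length out
  rw [h1, PySem.List.foldl_append_eq_flatMap]
  unfold pvEntries
  rw [PySem.List.enumerate_eq_map_pyRange cm ([] : List Int)]
  simp only [List.flatMap_map, List.nil_append]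
  rfl

-- the bucket dict: keys in first-occurrence order of the counts
lemma pv_build_keys :
    ∀ (E : List (Int × Int × Int)) (d : PySem.Dict Int (List (Int × Int × Int))),
      (E.foldl (fun d t => d.insert t.2.2 (d.getD t.2.2 [] ++ [t])) d).keys
        = (E.map (fun t => t.2.2)).foldl PySem.Set.add d.keys := by
  intro E
  induction E with
  | nil => intro d; simp
  | cons t E ih =>
      intro d
      simp only [List.foldl_cons, List.map_cons]
      rw [ih]
      congr 1
      by_cases h : d.contains t.2.2
      · rw [PySem.Dict.keys_insert_of_contains d _ h]
        have hm : t.2.2 ∈ d.keys := (PySem.Dict.contains_iff_mem_keys d t.2.2).1 h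
        simp [PySem.Set.add, hm]
      · rw [PySem.Dict.keys_insert_of_not_contains d _ (by simp [h])]
        have hm : t.2.2 ∉ d.keys := fun hm => h ((PySem.Dict.contains_iff_mem_keys d t.2.2).2 hm)
        simp [PySem.Set.add, hm]

-- the bucket dict: each bucket is the row-major filter of its count
lemma pv_build_getD :
    ∀ (E : List (Int × Int × Int)) (d : PySem.Dict Int (List (Int × Int × Int))) (c : Int),
      (E.foldl (fun d t => d.insert t.2.2 (d.getD t.2.2 [] ++ [t])) d).getD c []
        = d.getD c [] ++ E.filter (fun t => t.2.2 == c) := by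
  intro E
  induction E with
  | nil => intro d c; simp
  | cons t E ih =>
      intro d c
      simp only [List.foldl_cons, List.filter_cons]
      rw [ih, PySem.Dict.getD_insert]
      by_cases h : c = t.2.2
      · simp [h, List.append_assoc]
      · have : ¬ (t.2.2 == c) = true := by simp [beq_iff_eq]; omega
        simp [h, this]

-- descending sort of a nodup list is strictly descending
lemma pv_sorted_keys_desc (K : List Int) (hK : K.Nodup) :
    (PySem.List.sorted K (fun c => c) true).Pairwise (fun a b => b < a) := by
  have h1 := PySem.List.sorted_pairwise_rev K (fun c => c)
  have h2 : (PySem.List.sorted K (fun c => c) true).Nodup :=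
    (PySem.List.sorted_perm K (fun c => c) true).nodup_iff.2 hK
  exact (h1.and h2).imp (by intro a b ⟨hle, hne⟩; omega)

-- the equality of the two ports on every input
lemma pv_ports_eq (cm : List (List Int)) (top_n : Int) :
    top_confusions_py cm top_n = top_confusions_py_alt cm top_n := by
  unfold top_confusions_py top_confusions_py_alt
  simp only []
  -- B's entries are pvEntries
  have hslice : ∀ p : Int × List Int,
      PySem.List.slice p.2 none (some (cm.length : Int)) = p.2.take cm.length := by
    intro p
    rw [PySem.List.slice_to p.2 (by positivity)]
    simp
  have hEntries :
      ((PySem.List.enumerate cm 0).flatMap (fun p =>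
        (PySem.List.enumerate (PySem.List.slice p.2 none (some (cm.length : Int))) 0).filterMap (fun q =>
          if p.1 ≠ q.1 ∧ 0 < q.2 then some (p.1, q.1, q.2) else none)))
      = pvEntries cm := by
    unfold pvEntries
    apply List.flatMap_congr
    intro p _
    rw [hslice p]
  rw [hEntries, pv_outA_eq cm]
  set E := pvEntries cm with hE
  -- B's dict
  set bld := E.foldl (fun d t => d.insert t.2.2 (d.getD t.2.2 [] ++ [t]))
    (PySem.Dict.empty : PySem.Dict Int (List (Int × Int × Int))) with hbld
  have hkeys : bld.keys = PySem.Set.ofList (E.map (fun t => t.2.2)) := by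
    rw [hbld, pv_build_keys]
    rfl
  have hgetD : ∀ c, bld.getD c [] = E.filter (fun t => t.2.2 == c) := by
    intro c
    rw [hbld, pv_build_getD]
    simp [PySem.Dict.getD, PySem.Dict.get?, PySem.Dict.empty]
  set D := PySem.List.sorted bld.keys (fun c => c) true with hD
  have hdesc : D.Pairwise (fun a b => b < a) := by
    rw [hD]
    apply pv_sorted_keys_desc
    rw [hkeys]
    exact PySem.Set.nodup_ofList _
  have hcov : ∀ t ∈ E, t.2.2 ∈ D := by
    intro t ht
    rw [hD, PySem.List.mem_sorted, hkeys, PySem.Set.mem_ofList]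
    exact List.mem_map_of_mem ht
  have hB : D.foldl (fun out c => out ++ bld.getD c []) []
      = D.flatMap (fun c => E.filter (fun t => t.2.2 == c)) := by
    rw [PySem.List.foldl_append_eq_flatMap]
    simp only [List.nil_append]
    apply List.flatMap_congr
    intro c _
    exact hgetD c
  rw [hB, ← pv_sorted_flat D hdesc E hcov]

-- ===== VERDICT (by name: the statement is the Claim_ definition above) =====
theorem top_confusions_py_spec : Claim_equal_top_confusions_py := by
  intro cm top_n _ _
  unfold Spec_top_confusions_py
  exact pv_ports_eq cm top_n
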